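-- pv_equiv track=rewrite | github.com/SergeantYork/SergeantAgainstCrypto | All_Hail_Caesar.py | create_shift_substitutions
-- ===== SOURCE A (Python) =====
-- import string
--
-- def create_shift_substitutions(n):
--     encoding = {}
--     decoding = {}
--     alphabet_size = len(string.ascii_uppercase)
--     for i in range(alphabet_size):
--         letter = string.ascii_uppercase[i]
--         substitute_letter = string.ascii_uppercase[(i + n) % alphabet_size]
--         # The modulo is to cope with values higher then 26
--
--         encoding[letter] = substitute_letter
--         decoding[substitute_letter] = letter
--
--     return encoding, decoding
-- ===== SOURCE B (Python) =====
-- import string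
--
-- def create_shift_substitutions(n):
--     m = n % 26
--     up = string.ascii_uppercase
--     shifted = up[m:] + up[:m]
--     encoding = dict(zip(up, shifted))
--     decoding = dict(zip(shifted, up))
--     return encoding, decoding
-- ===== Notes on version B (the rewrite author's own statement) =====
-- stated objective: simpler
-- what changed: B builds the whole substitution at once by rotating the alphabet with two slices (up[m:]+up[:m], m = n % 26) and zipping it against the alphabet, instead of A's loop that indexes each letter individually with (i+n) % 26.
import Mathlib
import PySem

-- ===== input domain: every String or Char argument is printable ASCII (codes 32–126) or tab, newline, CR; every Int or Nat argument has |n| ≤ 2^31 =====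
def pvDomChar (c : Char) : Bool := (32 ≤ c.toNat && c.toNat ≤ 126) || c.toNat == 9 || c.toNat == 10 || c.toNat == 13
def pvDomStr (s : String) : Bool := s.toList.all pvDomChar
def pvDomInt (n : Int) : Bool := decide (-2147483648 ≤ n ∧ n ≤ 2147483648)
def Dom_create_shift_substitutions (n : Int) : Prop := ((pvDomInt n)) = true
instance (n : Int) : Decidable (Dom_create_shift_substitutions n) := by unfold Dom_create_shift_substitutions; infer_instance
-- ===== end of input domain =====

-- B builds the substitution by rotating the alphabet with two slices and zipping, instead of A's per-letter (i+n)%26 indexing loop; objective: simpler.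


-- ===== PORT A =====
-- string.ascii_uppercase as a list of characters
def pvUpper : List Char :=
  ['A','B','C','D','E','F','G','H','I','J','K','L','M',
   'N','O','P','Q','R','S','T','U','V','W','X','Y','Z']

-- one iteration of A's loop body; i ∈ range(26) and (i+n)%26 ∈ [0,26), so pyGetD's
-- default is never used and the indexing is exact
def pvStepA (n : Int) (st : PySem.Dict String String × PySem.Dict String String) (i : Int) :
    PySem.Dict String String × PySem.Dict String String :=
  let letter := String.ofList [PySem.List.pyGetD pvUpper i 'A']
  let substitute_letter :=
    String.ofList [PySem.List.pyGetD pvUpper (PySem.Int.mod (i + n) (pvUpper.length : Int)) 'A']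
  (st.1.insert letter substitute_letter, st.2.insert substitute_letter letter)

def create_shift_substitutions (n : Int) : (List (String × String)) × (List (String × String)) :=
  let alphabet_size : Int := (pvUpper.length : Int)
  let st := (PySem.List.pyRange 0 alphabet_size 1).foldl (pvStepA n)
      (PySem.Dict.empty, PySem.Dict.empty)
  (st.1.items, st.2.items)

-- ===== PORT B =====
def create_shift_substitutions_alt (n : Int) : (List (String × String)) × (List (String × String)) :=
  let m := PySem.Int.mod n 26
  let shifted := PySem.List.slice pvUpper (some m) none ++ PySem.List.slice pvUpper none (some m)
  let ups := pvUpper.map (fun c => String.ofList [c])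
  let shs := shifted.map (fun c => String.ofList [c])
  ((PySem.Dict.ofList (ups.zip shs)).items, (PySem.Dict.ofList (shs.zip ups)).items)

-- ===== PRECONDITION & SPEC =====
def Spec_create_shift_substitutions (n : Int) (out : (List (String × String)) × (List (String × String))) : Prop := out = create_shift_substitutions_alt n
instance (n : Int) (out : (List (String × String)) × (List (String × String))) : Decidable (Spec_create_shift_substitutions n out) := by unfold Spec_create_shift_substitutions; infer_instance

-- ===== CLAIM (what is proved, stated in full; the proofs are below) =====
def Claim_equal_create_shift_substitutions : Prop := ∀ (n : Int), Dom_create_shift_substitutions n → Spec_create_shift_substitutions n (create_shift_substitutions n)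

-- ===== LEMMAS AND PROOFS =====
lemma pvStepA_mod (n : Int) : pvStepA n = pvStepA (PySem.Int.mod n 26) := by
  funext st i
  unfold pvStepA
  have h : PySem.Int.mod (i + n) (pvUpper.length : Int)
      = PySem.Int.mod (i + PySem.Int.mod n 26) (pvUpper.length : Int) := by
    have hl : ((pvUpper.length : Int)) = 26 := rfl
    rw [hl, PySem.Int.mod_eq_emod_of_pos (by norm_num),
        PySem.Int.mod_eq_emod_of_pos (by norm_num),
        PySem.Int.mod_eq_emod_of_pos (by norm_num)]
    omega
  rw [h]

lemma pvAlt_mod (n : Int) :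
    create_shift_substitutions_alt (PySem.Int.mod n 26) = create_shift_substitutions_alt n := by
  unfold create_shift_substitutions_alt
  have h : PySem.Int.mod (PySem.Int.mod n 26) 26 = PySem.Int.mod n 26 := by
    rw [PySem.Int.mod_eq_emod_of_pos (by norm_num),
        PySem.Int.mod_eq_emod_of_pos (by norm_num)]
    omega
  rw [h]

lemma pvKey : ∀ m : Int, 0 ≤ m → m < 26 →
    create_shift_substitutions m = create_shift_substitutions_alt m := by
  intro m h1 h2
  interval_cases m <;> decide

-- ===== VERDICT (by name: the statement is the Claim_ definition above) =====
theorem create_shift_substitutions_spec : Claim_equal_create_shift_substitutions := by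
  intro n _
  unfold Spec_create_shift_substitutions
  have h1 : create_shift_substitutions n = create_shift_substitutions (PySem.Int.mod n 26) := by
    unfold create_shift_substitutions
    rw [pvStepA_mod]
  rw [h1, ← pvAlt_mod n]
  exact pvKey _ (PySem.Int.mod_nonneg n (by norm_num)) (PySem.Int.mod_lt n (by norm_num))
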